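-- pv_equiv track=rewrite | github.com/pdet/ducklake-polars | src/ducklake_core/_writer.py | _parse_table_changes
-- ===== SOURCE A (Python) =====
-- def _parse_table_changes(
--     changes_made: str,
-- ) -> dict[int, set[str]]:
--     """Parse a ``changes_made`` string into ``{table_id: {change_types}}``.
--
--     Recognised prefixes:
--     ``inserted_into_table:``, ``deleted_from_table:``,
--     ``altered_table:``, ``dropped_table:``.
--     """
--     result: dict[int, set[str]] = {}
--     if not changes_made:
--         return result
--     for change in changes_made.split(","):
--         change = change.strip()
--         for prefix in (
--             "inserted_into_table:",
--             "deleted_from_table:",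
--             "altered_table:",
--             "dropped_table:",
--         ):
--             if change.startswith(prefix):
--                 try:
--                     tid = int(change[len(prefix):])
--                     result.setdefault(tid, set()).add(prefix.rstrip(":"))
--                 except ValueError:
--                     pass
--     return result
-- ===== SOURCE B (Python) =====
-- _NAMES = ("inserted_into_table", "deleted_from_table", "altered_table", "dropped_table")
--
--
-- def _parse_table_changes(changes_made):
--     # stage 1: parse each token into a (table_id, change_name) pair
--     pairs = []
--     for token in changes_made.split(","):
--         name, sep, num = token.strip().partition(":")
--         if sep and name in _NAMES:
--             try:
--                 pairs.append((int(num), name))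
--             except ValueError:
--                 pass
--     # stage 2: aggregate the flat pair list into the result mapping
--     result = {}
--     for tid, name in pairs:
--         result.setdefault(tid, set()).add(name)
--     return result
-- ===== Notes on version B (the rewrite author's own statement) =====
-- stated objective: alternative
-- what changed: B is a two-stage pipeline: a parse pass turns each token into an (id, name) pair via partition at the first colon plus one tuple-membership test (no per-token four-way startswith scan, no dict during the scan), then a separate aggregation pass folds the flat pair list into the dict of sets.
import Mathlib
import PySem

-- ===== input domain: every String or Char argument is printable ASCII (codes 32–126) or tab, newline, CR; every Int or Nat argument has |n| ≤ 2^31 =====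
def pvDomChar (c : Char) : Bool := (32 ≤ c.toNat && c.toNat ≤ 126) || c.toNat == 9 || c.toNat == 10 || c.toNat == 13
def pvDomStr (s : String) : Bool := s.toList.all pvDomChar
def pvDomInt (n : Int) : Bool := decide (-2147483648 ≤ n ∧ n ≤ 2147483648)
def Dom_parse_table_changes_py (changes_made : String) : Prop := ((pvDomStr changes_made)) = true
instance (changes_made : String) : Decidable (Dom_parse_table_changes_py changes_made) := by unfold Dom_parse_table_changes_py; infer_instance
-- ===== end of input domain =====

-- B is a two-stage pipeline (parse tokens into (id, name) pairs via partition-at-colon + one membership test, then aggregate the pair list into the dict) instead of A's single pass with a four-way startswith scan building the dict inline; same cost, different decomposition.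


-- ===== PORT A =====
-- the four prefix literals, in A's loop order
def pvPrefixesA : List (List Char) :=
  ["inserted_into_table:".toList, "deleted_from_table:".toList,
   "altered_table:".toList, "dropped_table:".toList]

-- exact hand port of str.rstrip(":") (strip trailing ':' characters); only applied to the literal prefixes
def pvRstripColon (cs : List Char) : List Char := (cs.reverse.dropWhile (· == ':')).reverse

def parse_table_changes_py (changes_made : String) : List (Int × List String) :=
  (if changes_made = "" then (PySem.Dict.empty : PySem.Dict Int (PySem.Set String))
   else
     (PySem.Chars.splitOn changes_made.toList [',']).foldl (fun result change =>
       let c := PySem.Chars.strip change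
       pvPrefixesA.foldl (fun result pre =>
         if PySem.Chars.startswith c pre then
           -- try: tid = int(change[len(prefix):]); result.setdefault(tid, set()).add(prefix.rstrip(":")) except ValueError: pass
           match PySem.Int.ofChars? (PySem.List.slice c (some (pre.length : Int)) none) with
           | some tid => result.modify tid PySem.Set.empty (fun s => PySem.Set.add s (String.ofList (pvRstripColon pre)))
           | none => result
         else result) result) PySem.Dict.empty).items

-- ===== PORT B =====
-- the four recognised change names, as the tuple _NAMES
def pvNames : List (List Char) :=
  ["inserted_into_table".toList, "deleted_from_table".toList,
   "altered_table".toList, "dropped_table".toList]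

-- exact hand port of str.partition(":") for the one-character separator ':' :
-- (text before the first ':', ":" if present else "", text after the first ':')
def pvPartition3 : List Char → List Char × List Char × List Char
  | [] => ([], [], [])
  | c :: rest =>
      if c = ':' then ([], [':'], rest)
      else
        let p := pvPartition3 rest
        (c :: p.1, p.2)

def parse_table_changes_py_alt (changes_made : String) : List (Int × List String) :=
  -- stage 1: parse each token into a (table_id, change_name) pair
  let pairs := (PySem.Chars.splitOn changes_made.toList [',']).foldl
    (fun pairs token =>
      let q := pvPartition3 (PySem.Chars.strip token)
      if q.2.1 ≠ [] ∧ q.1 ∈ pvNames then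
        match PySem.Int.ofChars? q.2.2 with
        | some tid => pairs ++ [(tid, q.1)]
        | none => pairs
      else pairs) ([] : List (Int × List Char))
  -- stage 2: aggregate the flat pair list into the result mapping
  (pairs.foldl
    (fun result p =>
      result.modify p.1 PySem.Set.empty (fun s => PySem.Set.add s (String.ofList p.2)))
    (PySem.Dict.empty : PySem.Dict Int (PySem.Set String))).items

-- ===== PRECONDITION & SPEC =====
def Spec_parse_table_changes_py (changes_made : String) (out : List (Int × List String)) : Prop := out = parse_table_changes_py_alt changes_made
instance (changes_made : String) (out : List (Int × List String)) : Decidable (Spec_parse_table_changes_py changes_made out) := by unfold Spec_parse_table_changes_py; infer_instance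

-- ===== CLAIM (what is proved, stated in full; the proofs are below) =====
def Claim_equal_parse_table_changes_py : Prop := ∀ (changes_made : String), Dom_parse_table_changes_py changes_made → Spec_parse_table_changes_py changes_made (parse_table_changes_py changes_made)

-- ===== LEMMAS AND PROOFS =====

-- the pair (or nothing) that stage 1 of B emits for one token
def pvTok (token : List Char) : List (Int × List Char) :=
  let q := pvPartition3 (PySem.Chars.strip token)
  if q.2.1 ≠ [] ∧ q.1 ∈ pvNames then
    match PySem.Int.ofChars? q.2.2 with
    | some tid => [(tid, q.1)]
    | none => []
  else []

theorem pvTok_def (t : List Char) :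
    pvTok t =
      (if (pvPartition3 (PySem.Chars.strip t)).2.1 ≠ [] ∧ (pvPartition3 (PySem.Chars.strip t)).1 ∈ pvNames then
        match PySem.Int.ofChars? (pvPartition3 (PySem.Chars.strip t)).2.2 with
        | some tid => [(tid, (pvPartition3 (PySem.Chars.strip t)).1)]
        | none => []
      else []) := rfl

theorem pvPartition3_spec (cs : List Char) :
    ':' ∉ (pvPartition3 cs).1 ∧
    (((pvPartition3 cs).2.1 = [':'] ∧ cs = (pvPartition3 cs).1 ++ ':' :: (pvPartition3 cs).2.2) ∨
     (':' ∉ cs ∧ (pvPartition3 cs).1 = cs ∧ (pvPartition3 cs).2.1 = [] ∧ (pvPartition3 cs).2.2 = [])) := by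
  induction cs with
  | nil => simp [pvPartition3]
  | cons c rest ih =>
    by_cases hc : c = ':'
    · subst hc; simp [pvPartition3]
    · obtain ⟨h1, h2⟩ := ih
      simp only [pvPartition3, if_neg hc]
      refine ⟨by simp [h1, Ne.symm hc], ?_⟩
      rcases h2 with ⟨hs, h⟩ | ⟨h3, h4, h5, h6⟩
      · left; exact ⟨hs, by simpa using congrArg (c :: ·) h⟩
      · right; simp [h3, h4, h5, h6, Ne.symm hc]

theorem pv_startswith_false_of_nocolon (cs n : List Char) (h : ':' ∉ cs) :
    PySem.Chars.startswith cs (n ++ [':']) = false := by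
  rw [Bool.eq_false_iff]
  intro hsw
  rw [PySem.Chars.startswith_iff] at hsw
  exact h (hsw.subset (by simp))

theorem pv_startswith_iff (a b n : List Char) (ha : ':' ∉ a) (hn : ':' ∉ n) :
    PySem.Chars.startswith (a ++ ':' :: b) (n ++ [':']) = true ↔ n = a := by
  rw [PySem.Chars.startswith_iff]
  constructor
  · intro hp
    induction n generalizing a with
    | nil =>
      cases a with
      | nil => rfl
      | cons x a' =>
        exfalso
        simp only [List.nil_append, List.cons_append, List.cons_prefix_cons] at hp
        simp only [List.mem_cons, not_or] at ha
        exact ha.1 hp.1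
    | cons x n' ih =>
      cases a with
      | nil =>
        exfalso
        simp only [List.cons_append, List.nil_append, List.cons_prefix_cons] at hp
        simp only [List.mem_cons, not_or] at hn
        exact hn.1 hp.1.symm
      | cons y a' =>
        simp only [List.cons_append, List.cons_prefix_cons] at hp
        simp only [List.mem_cons, not_or] at ha hn
        have := ih a' ha.2 hn.2 hp.2
        simp [hp.1, this]
  · rintro rfl
    exact ⟨b, by simp⟩

theorem pv_drop_len (n b : List Char) (c : Char) : (n ++ c :: b).drop (n.length + 1) = b := by
  have : n ++ c :: b = (n ++ [c]) ++ b := by simp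
  rw [this, show n.length + 1 = (n ++ [c]).length by simp, List.drop_left]

-- A's inner four-way startswith scan on a token that DOES contain a colon, as one name lookup
theorem pv_step_colon (d : PySem.Dict Int (PySem.Set String)) (a b : List Char) (h1 : ':' ∉ a) :
    (pvPrefixesA.foldl (fun result pre =>
        if PySem.Chars.startswith (a ++ ':' :: b) pre then
          match PySem.Int.ofChars? (PySem.List.slice (a ++ ':' :: b) (some (pre.length : Int)) none) with
          | some tid => result.modify tid PySem.Set.empty (fun s => PySem.Set.add s (String.ofList (pvRstripColon pre)))
          | none => result
        else result) d) =
    (if a ∈ pvNames then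
       match PySem.Int.ofChars? b with
       | some tid => d.modify tid PySem.Set.empty (fun s => PySem.Set.add s (String.ofList a))
       | none => d
     else d) := by
  simp only [pvPrefixesA, List.foldl]
  rw [show ("inserted_into_table:".toList) = "inserted_into_table".toList ++ [':'] from rfl,
      show ("deleted_from_table:".toList) = "deleted_from_table".toList ++ [':'] from rfl,
      show ("altered_table:".toList) = "altered_table".toList ++ [':'] from rfl,
      show ("dropped_table:".toList) = "dropped_table".toList ++ [':'] from rfl]
  by_cases e1 : "inserted_into_table".toList = a
  · rw [if_pos ((pv_startswith_iff a b "inserted_into_table".toList h1 (by decide)).mpr e1)]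
    rw [if_neg (show ¬(PySem.Chars.startswith (a ++ ':' :: b) ("deleted_from_table".toList ++ [':']) = true) from by
      rw [pv_startswith_iff a b _ h1 (by decide)]; intro h; exact absurd (h.trans e1.symm) (by decide))]
    rw [if_neg (show ¬(PySem.Chars.startswith (a ++ ':' :: b) ("altered_table".toList ++ [':']) = true) from by
      rw [pv_startswith_iff a b _ h1 (by decide)]; intro h; exact absurd (h.trans e1.symm) (by decide))]
    rw [if_neg (show ¬(PySem.Chars.startswith (a ++ ':' :: b) ("dropped_table".toList ++ [':']) = true) from by
      rw [pv_startswith_iff a b _ h1 (by decide)]; intro h; exact absurd (h.trans e1.symm) (by decide))]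
    rw [PySem.List.slice_from_natCast, ← e1, show (("inserted_into_table".toList ++ [':']).length) = "inserted_into_table".toList.length + 1 by simp, pv_drop_len]
    rw [if_pos (show "inserted_into_table".toList ∈ pvNames by decide)]
    rfl
  by_cases e2 : "deleted_from_table".toList = a
  · rw [if_pos ((pv_startswith_iff a b "deleted_from_table".toList h1 (by decide)).mpr e2)]
    rw [if_neg (show ¬(PySem.Chars.startswith (a ++ ':' :: b) ("inserted_into_table".toList ++ [':']) = true) from by
      rw [pv_startswith_iff a b _ h1 (by decide)]; intro h; exact absurd (h.trans e2.symm) (by decide))]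
    rw [if_neg (show ¬(PySem.Chars.startswith (a ++ ':' :: b) ("altered_table".toList ++ [':']) = true) from by
      rw [pv_startswith_iff a b _ h1 (by decide)]; intro h; exact absurd (h.trans e2.symm) (by decide))]
    rw [if_neg (show ¬(PySem.Chars.startswith (a ++ ':' :: b) ("dropped_table".toList ++ [':']) = true) from by
      rw [pv_startswith_iff a b _ h1 (by decide)]; intro h; exact absurd (h.trans e2.symm) (by decide))]
    rw [PySem.List.slice_from_natCast, ← e2, show (("deleted_from_table".toList ++ [':']).length) = "deleted_from_table".toList.length + 1 by simp, pv_drop_len]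
    rw [if_pos (show "deleted_from_table".toList ∈ pvNames by decide)]
    rfl
  by_cases e3 : "altered_table".toList = a
  · rw [if_pos ((pv_startswith_iff a b "altered_table".toList h1 (by decide)).mpr e3)]
    rw [if_neg (show ¬(PySem.Chars.startswith (a ++ ':' :: b) ("inserted_into_table".toList ++ [':']) = true) from by
      rw [pv_startswith_iff a b _ h1 (by decide)]; intro h; exact absurd (h.trans e3.symm) (by decide))]
    rw [if_neg (show ¬(PySem.Chars.startswith (a ++ ':' :: b) ("deleted_from_table".toList ++ [':']) = true) from by
      rw [pv_startswith_iff a b _ h1 (by decide)]; intro h; exact absurd (h.trans e3.symm) (by decide))]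
    rw [if_neg (show ¬(PySem.Chars.startswith (a ++ ':' :: b) ("dropped_table".toList ++ [':']) = true) from by
      rw [pv_startswith_iff a b _ h1 (by decide)]; intro h; exact absurd (h.trans e3.symm) (by decide))]
    rw [PySem.List.slice_from_natCast, ← e3, show (("altered_table".toList ++ [':']).length) = "altered_table".toList.length + 1 by simp, pv_drop_len]
    rw [if_pos (show "altered_table".toList ∈ pvNames by decide)]
    rfl
  by_cases e4 : "dropped_table".toList = a
  · rw [if_pos ((pv_startswith_iff a b "dropped_table".toList h1 (by decide)).mpr e4)]
    rw [if_neg (show ¬(PySem.Chars.startswith (a ++ ':' :: b) ("inserted_into_table".toList ++ [':']) = true) from by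
      rw [pv_startswith_iff a b _ h1 (by decide)]; intro h; exact absurd (h.trans e4.symm) (by decide))]
    rw [if_neg (show ¬(PySem.Chars.startswith (a ++ ':' :: b) ("deleted_from_table".toList ++ [':']) = true) from by
      rw [pv_startswith_iff a b _ h1 (by decide)]; intro h; exact absurd (h.trans e4.symm) (by decide))]
    rw [if_neg (show ¬(PySem.Chars.startswith (a ++ ':' :: b) ("altered_table".toList ++ [':']) = true) from by
      rw [pv_startswith_iff a b _ h1 (by decide)]; intro h; exact absurd (h.trans e4.symm) (by decide))]
    rw [PySem.List.slice_from_natCast, ← e4, show (("dropped_table".toList ++ [':']).length) = "dropped_table".toList.length + 1 by simp, pv_drop_len]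
    rw [if_pos (show "dropped_table".toList ∈ pvNames by decide)]
    rfl
  rw [if_neg (show ¬(PySem.Chars.startswith (a ++ ':' :: b) ("inserted_into_table".toList ++ [':']) = true) from by
    rw [pv_startswith_iff a b _ h1 (by decide)]; exact e1)]
  rw [if_neg (show ¬(PySem.Chars.startswith (a ++ ':' :: b) ("deleted_from_table".toList ++ [':']) = true) from by
    rw [pv_startswith_iff a b _ h1 (by decide)]; exact e2)]
  rw [if_neg (show ¬(PySem.Chars.startswith (a ++ ':' :: b) ("altered_table".toList ++ [':']) = true) from by
    rw [pv_startswith_iff a b _ h1 (by decide)]; exact e3)]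
  rw [if_neg (show ¬(PySem.Chars.startswith (a ++ ':' :: b) ("dropped_table".toList ++ [':']) = true) from by
    rw [pv_startswith_iff a b _ h1 (by decide)]; exact e4)]
  rw [if_neg (show ¬(a ∈ pvNames) from by
    intro hm
    simp only [pvNames, List.mem_cons, List.not_mem_nil, or_false] at hm
    rcases hm with h | h | h | h
    · exact e1 h.symm
    · exact e2 h.symm
    · exact e3 h.symm
    · exact e4 h.symm)]

-- per token: A's inner scan applied to dict d equals folding the token's pvTok pairs into d
theorem pv_step_eq (d : PySem.Dict Int (PySem.Set String)) (t : List Char) :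
    (pvPrefixesA.foldl (fun result pre =>
        if PySem.Chars.startswith (PySem.Chars.strip t) pre then
          match PySem.Int.ofChars? (PySem.List.slice (PySem.Chars.strip t) (some (pre.length : Int)) none) with
          | some tid => result.modify tid PySem.Set.empty (fun s => PySem.Set.add s (String.ofList (pvRstripColon pre)))
          | none => result
        else result) d) =
    (pvTok t).foldl
      (fun result p => result.modify p.1 PySem.Set.empty (fun s => PySem.Set.add s (String.ofList p.2))) d := by
  obtain ⟨h1, h2⟩ := pvPartition3_spec (PySem.Chars.strip t)
  rw [pvTok_def]
  rcases h2 with ⟨hs, hsplit⟩ | ⟨hnc, hfst, hmid, hsnd⟩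
  · conv_lhs => rw [hsplit]
    rw [pv_step_colon _ _ _ h1]
    by_cases hmem : (pvPartition3 (PySem.Chars.strip t)).1 ∈ pvNames
    · rw [if_pos hmem, if_pos ⟨by simp [hs], hmem⟩]
      cases PySem.Int.ofChars? (pvPartition3 (PySem.Chars.strip t)).2.2 <;>
        simp [List.foldl]
    · rw [if_neg hmem, if_neg (fun h => hmem h.2)]; rfl
  · rw [if_neg (fun h => h.1 hmid)]
    simp only [pvPrefixesA, List.foldl]
    rw [show ("inserted_into_table:".toList) = "inserted_into_table".toList ++ [':'] from rfl,
        show ("deleted_from_table:".toList) = "deleted_from_table".toList ++ [':'] from rfl,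
        show ("altered_table:".toList) = "altered_table".toList ++ [':'] from rfl,
        show ("dropped_table:".toList) = "dropped_table".toList ++ [':'] from rfl]
    simp only [pv_startswith_false_of_nocolon _ _ hnc, Bool.false_eq_true, if_false]

-- stage 1 of B is the flatMap of pvTok over the tokens
theorem pv_stage1_eq (tokens : List (List Char)) (acc : List (Int × List Char)) :
    tokens.foldl
      (fun pairs token =>
        let q := pvPartition3 (PySem.Chars.strip token)
        if q.2.1 ≠ [] ∧ q.1 ∈ pvNames then
          match PySem.Int.ofChars? q.2.2 with
          | some tid => pairs ++ [(tid, q.1)]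
          | none => pairs
        else pairs) acc = acc ++ tokens.flatMap pvTok := by
  induction tokens generalizing acc with
  | nil => simp
  | cons t ts ih =>
    simp only [List.foldl, List.flatMap_cons]
    rw [ih]
    have : (let q := pvPartition3 (PySem.Chars.strip t)
            if q.2.1 ≠ [] ∧ q.1 ∈ pvNames then
              match PySem.Int.ofChars? q.2.2 with
              | some tid => acc ++ [(tid, q.1)]
              | none => acc
            else acc) = acc ++ pvTok t := by
      rw [pvTok_def]
      show (if (pvPartition3 (PySem.Chars.strip t)).2.1 ≠ [] ∧ (pvPartition3 (PySem.Chars.strip t)).1 ∈ pvNames then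
              match PySem.Int.ofChars? (pvPartition3 (PySem.Chars.strip t)).2.2 with
              | some tid => acc ++ [(tid, (pvPartition3 (PySem.Chars.strip t)).1)]
              | none => acc
            else acc) = _
      split_ifs with h
      · cases PySem.Int.ofChars? (pvPartition3 (PySem.Chars.strip t)).2.2 <;> simp
      · simp
    rw [this, List.append_assoc]

-- A's dict-building pass over the tokens equals the dict fold over the concatenated pair lists
theorem pv_main_fold (tokens : List (List Char)) (d : PySem.Dict Int (PySem.Set String)) :
    tokens.foldl (fun result change =>
      let c := PySem.Chars.strip change
      pvPrefixesA.foldl (fun result pre =>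
        if PySem.Chars.startswith c pre then
          match PySem.Int.ofChars? (PySem.List.slice c (some (pre.length : Int)) none) with
          | some tid => result.modify tid PySem.Set.empty (fun s => PySem.Set.add s (String.ofList (pvRstripColon pre)))
          | none => result
        else result) result) d =
    (tokens.flatMap pvTok).foldl
      (fun result p => result.modify p.1 PySem.Set.empty (fun s => PySem.Set.add s (String.ofList p.2))) d := by
  induction tokens generalizing d with
  | nil => rfl
  | cons t ts ih =>
    simp only [List.foldl, List.flatMap_cons, List.foldl_append]
    rw [show (let c := PySem.Chars.strip t
              pvPrefixesA.foldl (fun result pre =>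
                if PySem.Chars.startswith c pre then
                  match PySem.Int.ofChars? (PySem.List.slice c (some (pre.length : Int)) none) with
                  | some tid => result.modify tid PySem.Set.empty (fun s => PySem.Set.add s (String.ofList (pvRstripColon pre)))
                  | none => result
                else result) d) = _ from pv_step_eq d t]
    exact ih _

-- ===== VERDICT (by name: the statement is the Claim_ definition above) =====
theorem parse_table_changes_py_spec : Claim_equal_parse_table_changes_py := by
  intro s _
  show parse_table_changes_py s = parse_table_changes_py_alt s
  unfold parse_table_changes_py parse_table_changes_py_alt
  by_cases hs : s = ""
  · subst hs; rfl
  · simp only [if_neg hs]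
    rw [pv_main_fold, pv_stage1_eq]
    simp
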